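-- pv_equiv track=rewrite | github.com/alaouibs/codeWarsPython | StringIncrementer.py | increment_string
-- ===== SOURCE A (Python) =====
-- def increment_string(strng):
--     number = 0
--     output = ""
--     numberDigit = 0
--     findNotDigit = False
--     k = 0
--     for i in range(len(strng) - 1, -1, -1):
--         if strng[i].isdigit() and not findNotDigit:
--             numberDigit = numberDigit + 1
--             number = number + int(strng[i])*(10**k)
--             k = k + 1
--         else:
--             findNotDigit = True
--             output = strng[i] + output
--     number = number + 1
--     number = str(number)
--     for i in range(len(number), numberDigit):
--         number = "0" + number
--     return output + number
-- ===== SOURCE B (Python) =====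
-- def increment_string(strng):
--     d = 0
--     while d < len(strng) and strng[len(strng) - 1 - d].isdigit():
--         d += 1
--     out = []
--     carry = True
--     for ch in reversed(strng[len(strng) - d:]):
--         if carry and ch == '9':
--             out.append('0')
--         elif carry:
--             out.append(chr(ord(ch) + 1))
--             carry = False
--         else:
--             out.append(ch)
--     if carry:
--         out.append('1')
--     return strng[:len(strng) - d] + ''.join(reversed(out))
-- ===== Notes on version B (the rewrite author's own statement) =====
-- stated objective: faster
-- what changed: A converts the trailing digit run to an integer via positional 10^k accumulation, increments it, stringifies and re-pads with a zero-prepend loop; B never builds the number: it does a single right-to-left ripple-carry pass over the trailing digit characters, which preserves the padding width by construction.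
import Mathlib
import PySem

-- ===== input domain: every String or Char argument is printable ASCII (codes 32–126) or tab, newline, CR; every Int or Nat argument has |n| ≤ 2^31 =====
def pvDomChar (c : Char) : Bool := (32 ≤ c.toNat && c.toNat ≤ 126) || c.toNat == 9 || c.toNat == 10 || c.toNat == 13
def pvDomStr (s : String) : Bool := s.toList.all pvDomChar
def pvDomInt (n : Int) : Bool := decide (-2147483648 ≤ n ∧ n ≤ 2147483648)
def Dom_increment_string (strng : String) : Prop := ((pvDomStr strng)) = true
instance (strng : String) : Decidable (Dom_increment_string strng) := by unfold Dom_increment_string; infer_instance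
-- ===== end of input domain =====

-- B replaces A's big-number accumulation (digit·10^k sums, int→str, manual zero-prepend loop)
-- by a single right-to-left ripple-carry pass over the trailing digit characters (objective: faster, measured).

-- ===== PORT A =====
-- the loop body of A's backward for-loop, on the state (number, output, numberDigit, findNotDigit, k)
def stepA (st : Int × List Char × Int × Bool × Int) (c : Char) : Int × List Char × Int × Bool × Int :=
  if PySem.Chars.isdigit c && !st.2.2.2.1 then
    (st.1 + (PySem.Int.ofStr? (String.ofList [c])).getD 0 * 10 ^ st.2.2.2.2.toNat,
     st.2.1, st.2.2.1 + 1, st.2.2.2.1, st.2.2.2.2 + 1)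
  else
    (st.1, c :: st.2.1, st.2.2.1, true, st.2.2.2.2)

def increment_string (strng : String) : String :=
  let cs := strng.toList
  -- for i in range(len(strng) - 1, -1, -1): … (strng[i] cannot miss inside the loop, hence .getD ' ')
  let st := (PySem.List.pyRange ((cs.length : Int) - 1) (-1) (-1)).foldl
    (fun st i => stepA st ((PySem.List.pyGet? cs i).getD ' ')) (0, [], 0, false, 0)
  -- number = number + 1 ; number = str(number)
  let number := PySem.Int.toChars (st.1 + 1)
  -- for i in range(len(number), numberDigit): number = "0" + number
  let number := (PySem.List.pyRange (number.length : Int) st.2.2.1 1).foldl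
    (fun acc (_ : Int) => '0' :: acc) number
  String.ofList (st.2.1 ++ number)

-- ===== PORT B =====
-- while d < len(strng) and strng[len(strng) - 1 - d].isdigit(): d += 1   (counted over the reversed list)
def bTrail : List Char → Nat
  | [] => 0
  | c :: t => if PySem.Chars.isdigit c then bTrail t + 1 else 0

-- the loop body of B's carry loop, on the state (out, carry)
def stepB (st : List Char × Bool) (ch : Char) : List Char × Bool :=
  if st.2 && (ch == '9') then (st.1 ++ ['0'], true)
  else if st.2 then (st.1 ++ [Char.ofNat (ch.toNat + 1)], false)
  else (st.1 ++ [ch], st.2)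

def increment_string_alt (strng : String) : String :=
  let cs := strng.toList
  let d := bTrail cs.reverse
  -- for ch in reversed(strng[len(strng) - d:]): …
  let tail := PySem.List.slice cs (some ((cs.length : Int) - (d : Int))) none
  let st := tail.reverse.foldl stepB ([], true)
  let out := if st.2 then st.1 ++ ['1'] else st.1
  -- strng[:len(strng) - d] + ''.join(reversed(out))
  String.ofList (PySem.List.slice cs none (some ((cs.length : Int) - (d : Int))) ++ out.reverse)

-- ===== PRECONDITION & SPEC =====
def Spec_increment_string (strng : String) (out : String) : Prop := out = increment_string_alt strng
instance (strng : String) (out : String) : Decidable (Spec_increment_string strng out) := by unfold Spec_increment_string; infer_instance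

-- ===== CLAIM (what is proved, stated in full; the proofs are below) =====
def Claim_equal_increment_string : Prop := ∀ (strng : String), Dom_increment_string strng → Spec_increment_string strng (increment_string strng)

-- ===== LEMMAS AND PROOFS =====

-- value of a digit string given least-significant-first
def valRev : List Char → Nat
  | [] => 0
  | c :: t => (c.toNat - 48) + 10 * valRev t

-- canonical decimal digits of n (what Nat.toDigits 10 computes, fuel-free)
def digitsOf (n : Nat) : List Char :=
  if h : n < 10 then [Nat.digitChar n]
  else digitsOf (n / 10) ++ [Nat.digitChar (n % 10)]
  decreasing_by exact Nat.div_lt_self (by omega) (by omega)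

-- left-pad with '0' to width d
def padL (d : Nat) (xs : List Char) : List Char := List.replicate (d - xs.length) '0' ++ xs

-- structural form of B's carry loop (output least-significant-first)
def ripP : List Char → Bool → List Char × Bool
  | [], cy => ([], cy)
  | c :: t, cy =>
    if cy && (c == '9') then ('0' :: (ripP t true).1, (ripP t true).2)
    else if cy then (Char.ofNat (c.toNat + 1) :: (ripP t false).1, (ripP t false).2)
    else (c :: (ripP t cy).1, (ripP t cy).2)

def rip (l : List Char) (cy : Bool) : List Char :=
  (ripP l cy).1 ++ (if (ripP l cy).2 then ['1'] else [])

lemma digit_cases (c : Char) (h : PySem.Chars.isdigit c = true) :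
    c = '0' ∨ c = '1' ∨ c = '2' ∨ c = '3' ∨ c = '4' ∨ c = '5' ∨ c = '6' ∨ c = '7' ∨ c = '8' ∨ c = '9' := by
  simp only [PySem.Chars.isdigit, Bool.and_eq_true, decide_eq_true_eq, Char.le_def] at h
  obtain ⟨h1, h2⟩ := h
  have e : c = Char.ofNat c.toNat := (Char.ofNat_toNat c).symm
  have h1' : 48 ≤ c.toNat := by exact_mod_cast h1
  have h2' : c.toNat ≤ 57 := by exact_mod_cast h2
  interval_cases h : c.toNat <;> simp_all

lemma ofStr_digit (c : Char) (h : PySem.Chars.isdigit c = true) :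
    (PySem.Int.ofChars? [c]).getD 0 = ((c.toNat - 48 : Nat) : Int) := by
  rcases digit_cases c h with h|h|h|h|h|h|h|h|h|h <;> subst h <;> decide

lemma digitChar_self (c : Char) (h : PySem.Chars.isdigit c = true) :
    Nat.digitChar (c.toNat - 48) = c := by
  rcases digit_cases c h with h|h|h|h|h|h|h|h|h|h <;> subst h <;> decide

lemma digitChar_succ (c : Char) (h : PySem.Chars.isdigit c = true) (h9 : ¬ (c == '9') = true) :
    Nat.digitChar (c.toNat - 48 + 1) = Char.ofNat (c.toNat + 1) := by
  rcases digit_cases c h with h|h|h|h|h|h|h|h|h|h <;> subst h <;> first | decide | simp at h9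

lemma dig_le_nine (c : Char) (h : PySem.Chars.isdigit c = true) :
    c.toNat - 48 ≤ 9 ∧ (c.toNat - 48 = 9 ↔ (c == '9') = true) := by
  rcases digit_cases c h with h|h|h|h|h|h|h|h|h|h <;> subst h <;> decide

lemma toDigitsCore_eq (f n : Nat) (l : List Char) (hf : n < f) :
    Nat.toDigitsCore 10 f n l = digitsOf n ++ l := by
  induction f generalizing n l with
  | zero => omega
  | succ f ih =>
    rw [Nat.toDigitsCore]
    by_cases h : n / 10 = 0
    · rw [digitsOf]
      have h10 : n < 10 := by omega
      simp [h, h10, Nat.mod_eq_of_lt h10]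
    · have hn : 10 ≤ n := by omega
      have hlt : n / 10 < n := Nat.div_lt_self (by omega) (by omega)
      have : n / 10 < f := by omega
      simp only [h, if_false, ih (n / 10) _ this]
      conv_rhs => rw [digitsOf]
      simp [show ¬ n < 10 by omega]

lemma toDigits_eq (n : Nat) : Nat.toDigits 10 n = digitsOf n := by
  simpa using toDigitsCore_eq (n + 1) n [] (by omega)

lemma valRev_zero (l : List Char) (hd : ∀ c ∈ l, PySem.Chars.isdigit c = true)
    (hv : valRev l = 0) : l.reverse = List.replicate l.length '0' := by
  induction l with
  | nil => rfl
  | cons c t ih =>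
    have hc := hd c (by simp)
    have h48 : 48 ≤ c.toNat := by
      rcases digit_cases c hc with h|h|h|h|h|h|h|h|h|h <;> subst h <;> decide
    have hv' : c.toNat - 48 = 0 ∧ valRev t = 0 := by
      simp [valRev] at hv; omega
    have hc0 : c = '0' := by
      have := digitChar_self c hc
      rw [hv'.1] at this; exact this.symm
    subst hc0
    rw [List.reverse_cons, ih (fun x hx => hd x (by simp [hx])) hv'.2]
    simp [List.replicate_succ']

lemma padL_snoc (m : Nat) (X : List Char) (y : Char) :
    padL (m + 1) (X ++ [y]) = padL m X ++ [y] := by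
  simp [padL, List.append_assoc, Nat.succ_sub_succ]

-- canonical-form lemma: a nonempty digit string is its value's digits padded to its length
lemma canon (t : List Char) (hd : ∀ c ∈ t, PySem.Chars.isdigit c = true) (hne : t ≠ []) :
    padL t.length (digitsOf (valRev t)) = t.reverse := by
  induction t with
  | nil => simp at hne
  | cons c u ih =>
    have hc := hd c (by simp)
    have hdu : ∀ x ∈ u, PySem.Chars.isdigit x = true := fun x hx => hd x (by simp [hx])
    have he9 : c.toNat - 48 ≤ 9 := (dig_le_nine c hc).1
    by_cases hw : valRev u = 0
    · have hval : valRev (c :: u) = c.toNat - 48 := by simp [valRev, hw]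
      rw [hval, digitsOf, dif_pos (by omega : c.toNat - 48 < 10), digitChar_self c hc]
      rw [List.reverse_cons, valRev_zero u hdu hw]
      simp [padL]
    · have hu : u ≠ [] := by intro h; subst h; simp [valRev] at hw
      have hval : valRev (c :: u) = (c.toNat - 48) + 10 * valRev u := rfl
      rw [hval, digitsOf, dif_neg (by omega : ¬ ((c.toNat - 48) + 10 * valRev u < 10))]
      have hdiv : ((c.toNat - 48) + 10 * valRev u) / 10 = valRev u := by omega
      have hmod : ((c.toNat - 48) + 10 * valRev u) % 10 = c.toNat - 48 := by omega
      rw [hdiv, hmod, digitChar_self c hc]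
      show padL (u.length + 1) (digitsOf (valRev u) ++ [c]) = (c :: u).reverse
      rw [padL_snoc, ih hdu hu]
      simp

lemma ripP_false (l : List Char) : ripP l false = (l, false) := by
  induction l with
  | nil => rfl
  | cons c t ih => simp [ripP, ih]

-- the carry pass computes the incremented, padded digit string
lemma ripple_spec (l : List Char) (hd : ∀ c ∈ l, PySem.Chars.isdigit c = true) :
    (rip l true).reverse = padL l.length (digitsOf (valRev l + 1)) := by
  induction l with
  | nil =>
    rw [show valRev [] + 1 = 1 from rfl, digitsOf]
    simp [rip, ripP, padL]
    decide
  | cons c t ih =>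
    have hc := hd c (by simp)
    have hdt : ∀ x ∈ t, PySem.Chars.isdigit x = true := fun x hx => hd x (by simp [hx])
    have he9 := dig_le_nine c hc
    by_cases h9 : (c == '9') = true
    · have he : c.toNat - 48 = 9 := he9.2.mpr h9
      have hstep : rip (c :: t) true = '0' :: rip t true := by
        simp [rip, ripP, h9]
      rw [hstep, List.reverse_cons, ih hdt]
      have hval : valRev (c :: t) + 1 = 10 * (valRev t + 1) := by
        simp [valRev, he]; omega
      rw [hval]
      conv_rhs => rw [digitsOf]
      rw [dif_neg (by omega : ¬ (10 * (valRev t + 1) < 10))]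
      have hdiv : 10 * (valRev t + 1) / 10 = valRev t + 1 := by omega
      have hmod : 10 * (valRev t + 1) % 10 = 0 := by omega
      rw [hdiv, hmod]
      show padL t.length (digitsOf (valRev t + 1)) ++ ['0'] = padL (t.length + 1) (digitsOf (valRev t + 1) ++ ['0'])
      rw [padL_snoc]
    · have he : c.toNat - 48 ≠ 9 := fun h => h9 (he9.2.mp h)
      have hstep : rip (c :: t) true = Char.ofNat (c.toNat + 1) :: t := by
        simp [rip, ripP, h9, ripP_false]
      rw [hstep, List.reverse_cons]
      have hval : valRev (c :: t) + 1 = (c.toNat - 48 + 1) + 10 * valRev t := by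
        simp [valRev]; omega
      rw [hval]
      by_cases hw : valRev t = 0
      · rw [hw, digitsOf, dif_pos (by omega : (c.toNat - 48 + 1) + 10 * 0 < 10)]
        have : (c.toNat - 48 + 1) + 10 * 0 = c.toNat - 48 + 1 := by omega
        rw [this, digitChar_succ c hc h9, valRev_zero t hdt hw]
        simp [padL]
      · rw [digitsOf, dif_neg (by omega : ¬ ((c.toNat - 48 + 1) + 10 * valRev t < 10))]
        have hdiv : ((c.toNat - 48 + 1) + 10 * valRev t) / 10 = valRev t := by omega
        have hmod : ((c.toNat - 48 + 1) + 10 * valRev t) % 10 = c.toNat - 48 + 1 := by omega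
        rw [hdiv, hmod, digitChar_succ c hc h9]
        have ht : t ≠ [] := by intro h; subst h; simp [valRev] at hw
        show t.reverse ++ [Char.ofNat (c.toNat + 1)] = padL (t.length + 1) (digitsOf (valRev t) ++ [Char.ofNat (c.toNat + 1)])
        rw [padL_snoc, canon t hdt ht]

lemma bTrail_eq (l : List Char) : bTrail l = (l.takeWhile PySem.Chars.isdigit).length := by
  induction l with
  | nil => rfl
  | cons c t ih => by_cases h : PySem.Chars.isdigit c = true <;> simp [bTrail, h, ih]

lemma foldB_eq (l : List Char) (acc : List Char) (cy : Bool) :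
    l.foldl stepB (acc, cy) = (acc ++ (ripP l cy).1, (ripP l cy).2) := by
  induction l generalizing acc cy with
  | nil => simp [ripP]
  | cons c t ih =>
    by_cases h1 : cy = true
    · by_cases h2 : (c == '9') = true <;>
        simp [stepB, ripP, h1, h2, ih]
    · simp at h1
      simp [stepB, ripP, h1, ih]

lemma foldA2 (l : List Char) (v : Int) (out : List Char) (nd : Int) (k : Int) :
    l.foldl stepA (v, out, nd, true, k) = (v, l.reverse ++ out, nd, true, k) := by
  induction l generalizing out with
  | nil => simp
  | cons c t ih => simp [stepA, ih]

lemma foldA0 (rs : List Char) (v : Int) (out : List Char) (nd : Int) (kN : Nat) :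
    rs.foldl stepA (v, out, nd, false, (kN : Int)) =
      (v + (valRev (rs.takeWhile PySem.Chars.isdigit) : Int) * 10 ^ kN,
       (rs.dropWhile PySem.Chars.isdigit).reverse ++ out,
       nd + ((rs.takeWhile PySem.Chars.isdigit).length : Int),
       !(rs.dropWhile PySem.Chars.isdigit).isEmpty,
       ((kN + (rs.takeWhile PySem.Chars.isdigit).length : Nat) : Int)) := by
  induction rs generalizing v out nd kN with
  | nil => simp [valRev]
  | cons c t ih =>
    by_cases hc : PySem.Chars.isdigit c = true
    · rw [List.takeWhile_cons_of_pos hc, List.dropWhile_cons_of_pos hc]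
      have hstep : stepA (v, out, nd, false, (kN : Int)) c =
          (v + ((c.toNat - 48 : Nat) : Int) * 10 ^ kN, out, nd + 1, false, ((kN + 1 : Nat) : Int)) := by
        simp [stepA, hc, ofStr_digit c hc]
      rw [List.foldl_cons, hstep, ih]
      refine Prod.ext ?_ (Prod.ext rfl (Prod.ext ?_ (Prod.ext rfl ?_)))
      · show v + ((c.toNat - 48 : Nat) : Int) * 10 ^ kN + (valRev (t.takeWhile PySem.Chars.isdigit) : Int) * 10 ^ (kN + 1) =
          v + (valRev (c :: t.takeWhile PySem.Chars.isdigit) : Int) * 10 ^ kN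
        simp only [valRev]
        push_cast
        ring
      · show nd + 1 + ((t.takeWhile PySem.Chars.isdigit).length : Int) =
          nd + ((c :: t.takeWhile PySem.Chars.isdigit).length : Int)
        simp
        ring
      · show ((kN + 1 + (t.takeWhile PySem.Chars.isdigit).length : Nat) : Int) =
          ((kN + (c :: t.takeWhile PySem.Chars.isdigit).length : Nat) : Int)
        simp
        ring
    · simp only [Bool.not_eq_true] at hc
      rw [List.takeWhile_cons_of_neg (by simp [hc]), List.dropWhile_cons_of_neg (by simp [hc])]
      have hstep : stepA (v, out, nd, false, (kN : Int)) c = (v, c :: out, nd, true, (kN : Int)) := by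
        simp [stepA, hc]
      rw [List.foldl_cons, hstep, foldA2]
      simp [valRev]

lemma foldl_prepend {ι : Type} (l : List ι) (s : List Char) :
    l.foldl (fun acc (_ : ι) => '0' :: acc) s = List.replicate l.length '0' ++ s := by
  induction l generalizing s with
  | nil => simp
  | cons x t ih => simp [ih, List.replicate_succ']

lemma countdown_fold {β : Type} (cs : List Char) (h : β → Char → β) (init : β) :
    (PySem.List.pyRange ((cs.length : Int) - 1) (-1) (-1)).foldl
      (fun st i => h st ((PySem.List.pyGet? cs i).getD ' ')) init = cs.reverse.foldl h init := by
  induction cs using List.reverseRecOn generalizing init with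
  | nil =>
    rw [PySem.List.pyRange_neg_one_eq_nil (by simp)]
    simp
  | append_singleton cs c ih =>
    have hlen : (((cs ++ [c]).length : Int) - 1) = (cs.length : Int) := by simp
    rw [hlen, PySem.List.pyRange_neg_one_cons (by omega)]
    rw [List.foldl_cons]
    have hget : (PySem.List.pyGet? (cs ++ [c]) (cs.length : Int)).getD ' ' = c := by
      rw [PySem.List.pyGet?_append_length cs [] c]
      rfl
    rw [hget]
    have hcong : (PySem.List.pyRange ((cs.length : Int) - 1) (-1) (-1)).foldl
        (fun st i => h st ((PySem.List.pyGet? (cs ++ [c]) i).getD ' ')) (h init c) =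
        (PySem.List.pyRange ((cs.length : Int) - 1) (-1) (-1)).foldl
        (fun st i => h st ((PySem.List.pyGet? cs i).getD ' ')) (h init c) := by
      apply PySem.List.foldl_congr_mem
      intro acc x hx
      rw [PySem.List.mem_pyRange_neg_one] at hx
      have h0 : 0 ≤ x := by omega
      have hxl : x.toNat < cs.length := by omega
      rw [PySem.List.pyGet?_of_nonneg _ h0, PySem.List.pyGet?_of_nonneg _ h0,
        List.getElem?_append_left hxl]
    rw [hcong, ih]
    simp

lemma take_len_takeWhile (p : Char → Bool) (l : List Char) :
    l.take (l.takeWhile p).length = l.takeWhile p := by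
  induction l with
  | nil => rfl
  | cons c t ih =>
    by_cases h : p c = true
    · rw [List.takeWhile_cons_of_pos h]; simpa using ih
    · rw [List.takeWhile_cons_of_neg (by simp [h])]; rfl

lemma drop_len_takeWhile (p : Char → Bool) (l : List Char) :
    l.drop (l.takeWhile p).length = l.dropWhile p := by
  induction l with
  | nil => rfl
  | cons c t ih =>
    by_cases h : p c = true
    · rw [List.takeWhile_cons_of_pos h, List.dropWhile_cons_of_pos h]; simpa using ih
    · rw [List.takeWhile_cons_of_neg (by simp [h]), List.dropWhile_cons_of_neg (by simp [h])]; rfl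

lemma toChars_nat_succ (m : Nat) : PySem.Int.toChars ((m : Int) + 1) = digitsOf (m + 1) := by
  unfold PySem.Int.toChars
  rw [if_neg (by omega)]
  have h : ((m : Int) + 1).toNat = m + 1 := by omega
  rw [h, toDigits_eq]

lemma main_eq (strng : String) : increment_string strng = increment_string_alt strng := by
  unfold increment_string increment_string_alt
  simp only [countdown_fold]
  set cs := strng.toList with hcs
  set rs := cs.reverse with hrs
  set tw := rs.takeWhile PySem.Chars.isdigit with htw
  set dw := rs.dropWhile PySem.Chars.isdigit with hdw
  have hdigits : ∀ c ∈ tw, PySem.Chars.isdigit c = true := fun c hc => List.mem_takeWhile_imp hc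
  have hd_le : tw.length ≤ cs.length := by
    have := (List.takeWhile_prefix (p := PySem.Chars.isdigit) (l := rs)).length_le
    simpa [hrs] using this
  -- evaluate A's backward loop
  have hfold := foldA0 rs 0 [] 0 0
  simp only [Nat.cast_zero, pow_zero, mul_one, zero_add] at hfold
  rw [hfold]
  simp only [List.append_nil]
  rw [← htw, ← hdw]
  -- A's str(number + 1) and padding loop
  rw [toChars_nat_succ]
  rw [foldl_prepend]
  rw [PySem.List.length_pyRange_one]
  have hlenpad : (((tw.length : Int)) - ((digitsOf (valRev tw + 1)).length : Int)).toNat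
      = tw.length - (digitsOf (valRev tw + 1)).length := by omega
  rw [hlenpad]
  have hpadL : List.replicate (tw.length - (digitsOf (valRev tw + 1)).length) '0' ++
      digitsOf (valRev tw + 1) = padL tw.length (digitsOf (valRev tw + 1)) := rfl
  rw [hpadL, ← ripple_spec tw hdigits]
  -- B's boundary count and slices
  rw [bTrail_eq]
  have hnn : (0 : Int) ≤ (cs.length : Int) - (tw.length : Int) := by omega
  rw [PySem.List.slice_from cs hnn, PySem.List.slice_to cs hnn]
  have htoNat : ((cs.length : Int) - (tw.length : Int)).toNat = cs.length - tw.length := by omega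
  rw [htoNat]
  -- the sliced prefix is A's output, the reversed tail is the digit run
  have hdrop : rs.drop tw.length = dw := drop_len_takeWhile _ _
  have htake' : rs.take tw.length = tw := take_len_takeWhile _ _
  have hprefix : cs.take (cs.length - tw.length) = dw.reverse := by
    have h1 : (rs.drop tw.length).reverse = rs.reverse.take (rs.length - tw.length) :=
      List.reverse_drop
    rw [hdrop, hrs] at h1
    simp only [List.reverse_reverse, List.length_reverse] at h1
    exact h1.symm
  have htail : (cs.drop (cs.length - tw.length)).reverse = tw := by
    have h1 : (cs.drop (cs.length - tw.length)).reverse =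
        cs.reverse.take (cs.length - (cs.length - tw.length)) := List.reverse_drop
    rw [h1, ← hrs, show cs.length - (cs.length - tw.length) = tw.length by omega, htake']
  rw [hprefix, htail]
  -- B's carry loop is ripP / rip
  rw [foldB_eq]
  have hout : (if ([] ++ (ripP tw true).1, (ripP tw true).2).2 = true then
      ([] ++ (ripP tw true).1, (ripP tw true).2).1 ++ ['1']
      else ([] ++ (ripP tw true).1, (ripP tw true).2).1) = rip tw true := by
    by_cases h : (ripP tw true).2 = true <;> simp [rip, h]
  rw [hout]

-- ===== VERDICT (by name: the statement is the Claim_ definition above) =====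
theorem increment_string_spec : Claim_equal_increment_string := by
  unfold Claim_equal_increment_string Spec_increment_string
  intro strng _
  exact main_eq strng
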